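-- pv_equiv track=rewrite | github.com/khoantd/GitVizz | backend/utils/repo_utils.py | format_repo_structure
-- ===== SOURCE A (Python) =====
-- from typing import List, Optional, Dict, Any, Tuple
--
-- def format_repo_structure(files: List[dict]) -> str:
--     """Format repository directory structure into text."""
--     text = "Directory Structure:\n\n"
--     tree = {}
--     for file_item in files:  # Renamed 'file' to 'file_item' to avoid conflict
--         parts = file_item["path"].split("/")
--         current_level = tree
--         for i, part in enumerate(parts):
--             if part not in current_level:
--                 current_level[part] = {} if i < len(parts) - 1 else None
--             current_level = current_level[part] if i < len(parts) - 1 else current_level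
--
--     def build_index(node, prefix="", depth=0):
--         result = ""
--         # Sort entries: folders first, then files, all alphabetically
--         entries = sorted(node.items(), key=lambda x: (x[1] is None, x[0].lower()))
--         for i, (name, subnode) in enumerate(entries):
--             is_last = i == len(entries) - 1
--             line_prefix = "└── " if is_last else "├── "
--             child_prefix = "    " if is_last else "│   "
--             result += (
--                 f"{prefix}{line_prefix}{name}{'/' if subnode is not None else ''}\n"
--             )
--             if subnode is not None:
--                 result += build_index(subnode, f"{prefix}{child_prefix}", depth + 1)
--         return result
--
--     text += build_index(tree)
--     return text
-- ===== SOURCE B (Python) =====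
-- # Same trie phase (recursive insert instead of the aliasing descent loop), but the
-- # tree is rendered ITERATIVELY with an explicit LIFO stack of per-entry frames and
-- # the output collected in a line list joined once at the end (alternative decomposition).
-- from typing import List
--
--
-- def _insert(node, parts):
--     head, rest = parts[0], parts[1:]
--     if not rest:
--         node.setdefault(head, None)
--     else:
--         if head not in node:
--             node[head] = {}
--         _insert(node[head], rest)
--
--
-- def format_repo_structure(files: List[dict]) -> str:
--     """Format repository directory structure into text."""
--     tree = {}
--     for file_item in files:
--         _insert(tree, file_item["path"].split("/"))
--
--     lines = ["Directory Structure:\n\n"]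
--     stack = []
--
--     def push(node, prefix):
--         entries = sorted(node.items(), key=lambda x: (x[1] is None, x[0].lower()))
--         n = len(entries)
--         for i in range(n - 1, -1, -1):
--             name, subnode = entries[i]
--             stack.append((prefix, name, subnode, i == n - 1))
--
--     push(tree, "")
--     while stack:
--         prefix, name, subnode, is_last = stack.pop()
--         line_prefix = "└── " if is_last else "├── "
--         if subnode is None:
--             lines.append(f"{prefix}{line_prefix}{name}\n")
--         else:
--             lines.append(f"{prefix}{line_prefix}{name}/\n")
--             push(subnode, prefix + ("    " if is_last else "│   "))
--     return "".join(lines)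
-- ===== Notes on version B (the rewrite author's own statement) =====
-- stated objective: alternative
-- what changed: The recursive build_index (string concatenation, recursion per directory) is replaced by an explicit LIFO stack of (prefix, name, subnode, is_last) frames that pushes each node's sorted entries in reverse and collects lines into a list joined once at the end; the trie is filled by a recursive _insert instead of the aliasing descent loop.
import Mathlib
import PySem

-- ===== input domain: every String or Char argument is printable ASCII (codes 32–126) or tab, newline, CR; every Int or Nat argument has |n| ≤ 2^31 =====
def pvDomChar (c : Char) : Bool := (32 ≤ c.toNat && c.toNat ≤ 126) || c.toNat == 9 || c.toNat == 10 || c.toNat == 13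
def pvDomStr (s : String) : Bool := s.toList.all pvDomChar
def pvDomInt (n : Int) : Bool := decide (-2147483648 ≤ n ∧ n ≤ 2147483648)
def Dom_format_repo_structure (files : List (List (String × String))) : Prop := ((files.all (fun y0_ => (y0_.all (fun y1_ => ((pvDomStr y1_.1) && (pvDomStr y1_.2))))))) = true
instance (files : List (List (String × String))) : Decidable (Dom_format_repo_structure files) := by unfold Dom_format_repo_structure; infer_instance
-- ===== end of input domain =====

-- B renders the tree with an explicit LIFO stack and a joined line list instead of
-- build_index's recursion (alternative decomposition, same cost); same return value.

-- ===== shared helpers (identical Python fragments in A and B) =====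

-- The nested Python dict trie: an insertion-ordered dict mapping a name to None
-- (file) or a sub-dict (directory), encoded as a flat inductive (no nesting).
inductive PForest where
  | nil  : PForest
  | file : String → PForest → PForest            -- name ↦ None, rest of the dict
  | dir  : String → PForest → PForest → PForest  -- name ↦ sub-dict (children), rest
deriving DecidableEq, Repr

-- file_item["path"].split("/")  (identical in both Pythons; KeyError excluded by Pre_)
def pathParts (f : List (String × String)) : List String :=
  (PySem.Str.split? (((PySem.Dict.mk f).get? "path").getD "") "/").getD []

-- node.items()  (dict iteration in insertion order)
def pitems : PForest → List (String × Option PForest)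
  | .nil => []
  | .file n r => (n, none) :: pitems r
  | .dir n c r => (n, some c) :: pitems r

-- sorted(node.items(), key=lambda x: (x[1] is None, x[0].lower()))  (identical in A and B)
def sortEntries (es : List (String × Option PForest)) : List (String × Option PForest) :=
  PySem.List.sorted2 es (fun x => x.2.isNone) (fun x => PySem.Str.lower x.1) false

-- measures used only for termination of the recursions below
def PForest.fsize : PForest → Nat
  | .nil => 0
  | .file _ r => 1 + r.fsize
  | .dir _ c r => 1 + c.fsize + r.fsize

def owt : Option PForest → Nat
  | none => 1
  | some c => 1 + c.fsize

def entW (es : List (String × Option PForest)) : Nat := (es.map (fun e => owt e.2)).sum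

theorem entW_cons (x : String × Option PForest) (rest : List (String × Option PForest)) :
    entW (x :: rest) = owt x.2 + entW rest := by simp [entW]

theorem entW_sortEntries (es : List (String × Option PForest)) : entW (sortEntries es) = entW es := by
  unfold entW sortEntries
  exact ((PySem.List.sorted2_perm es (fun x => x.2.isNone) (fun x => PySem.Str.lower x.1)
    false).map (fun e => owt e.2)).sum_eq

theorem entW_pitems (t : PForest) : entW (pitems t) = t.fsize := by
  induction t with
  | nil => rfl
  | file n r ih => simp [pitems, entW_cons, owt, PForest.fsize, ih]
  | dir n c r ih ih2 => simp [pitems, entW_cons, owt, PForest.fsize, ih2] <;> omega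

-- ===== PORT A =====

-- 'part in current_level'
def aContains : PForest → String → Bool
  | .nil, _ => false
  | .file n r, p => n == p || aContains r p
  | .dir n _ r, p => n == p || aContains r p

-- 'current_level[part] = v' for a fresh key: a dict appends it at the end
def aAppend : PForest → String → Option PForest → PForest
  | .nil, p, none => .file p .nil
  | .nil, p, some c => .dir p c .nil
  | .file n r, p, sub => .file n (aAppend r p sub)
  | .dir n c r, p, sub => .dir n c (aAppend r p sub)

-- descend into current_level[part] and continue the loop (go) there
def aDescend (go : PForest → PForest) (p : String) : PForest → PForest
  | .nil => .nil
  | .file n r =>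
      -- Python raises TypeError here ('part in None'); Pre_ excludes this, value unused
      if n == p then .file n r else .file n (aDescend go p r)
  | .dir n c r => if n == p then .dir n (go c) r else .dir n c (aDescend go p r)

-- A's inner 'for i, part in enumerate(parts)' loop: the mutated current_level
-- alias becomes structural recursion over the remaining parts.
def aInsert : PForest → List String → PForest
  | t, [] => t
  | t, [p] => if aContains t p then t else aAppend t p none  -- last part: key ↦ None if fresh
  | t, p :: rest =>
      aDescend (fun c => aInsert c rest) p (if aContains t p then t else aAppend t p (some .nil))
-- termination measures for build_index's recursion over the sorted entries
theorem decChild (name : String) (c : PForest) (rest : List (String × Option PForest)) :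
    entW (sortEntries (pitems c)) < entW ((name, some c) :: rest) := by
  rw [entW_sortEntries, entW_pitems, entW_cons]; simp [owt]; omega

theorem decRest (x : String × Option PForest) (rest : List (String × Option PForest)) :
    entW rest < entW (x :: rest) := by
  rw [entW_cons]; cases hx : x.2 <;> simp [owt] <;> omega

-- build_index's 'for i, (name, subnode) in enumerate(entries)' loop over the sorted
-- entries; 'is_last = (i == len(entries)-1)' becomes 'rest is empty' (same value at
-- every step), and the recursive build_index call on a subnode re-enters at its
-- sorted entry list.
def buildGo : List (String × Option PForest) → String → String
  | [], _ => ""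
  | (name, sub) :: rest, pref =>
      let isLast := rest.isEmpty
      let linePref := if isLast then "└── " else "├── "
      let childPref := if isLast then "    " else "│   "
      (pref ++ linePref ++ name ++ (if sub.isSome then "/" else "") ++ "\n") ++
      (match sub with
       | some c => buildGo (sortEntries (pitems c)) (pref ++ childPref)
       | none => "") ++
      buildGo rest pref
termination_by es _ => entW es
decreasing_by
  · exact decChild name c rest
  · exact decRest (name, sub) rest

-- build_index(node, prefix)
def buildA (node : PForest) (pref : String) : String := buildGo (sortEntries (pitems node)) pref

def format_repo_structure (files : List (List (String × String))) : String :=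
  let tree := files.foldl (fun t f => aInsert t (pathParts f)) PForest.nil
  "Directory Structure:\n\n" ++ buildA tree ""

-- ===== PORT B =====

-- node.setdefault(head, None)
def bSetdefaultFile : PForest → String → PForest
  | .nil, p => .file p .nil
  | .file n r, p => if n == p then .file n r else .file n (bSetdefaultFile r p)
  | .dir n c r, p => if n == p then .dir n c r else .dir n c (bSetdefaultFile r p)

-- 'head not in node'
def bHas : PForest → String → Bool
  | .nil, _ => false
  | .file n r, p => n == p || bHas r p
  | .dir n _ r, p => n == p || bHas r p

-- 'node[head] = {}' (only reached when head is fresh: appends at the end)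
def bAddDir : PForest → String → PForest
  | .nil, p => .dir p .nil .nil
  | .file n r, p => .file n (bAddDir r p)
  | .dir n c r, p => .dir n c (bAddDir r p)

-- '_insert(node[head], rest)' (the nested call go) performed in place at key head
def bRecurseAt (go : PForest → PForest) (p : String) : PForest → PForest
  | .nil => .nil
  | .file n r =>
      -- node[head] is None: Python raises TypeError inside _insert; Pre_ excludes this
      if n == p then .file n r else .file n (bRecurseAt go p r)
  | .dir n c r => if n == p then .dir n (go c) r else .dir n c (bRecurseAt go p r)

-- B's recursive _insert
def bInsert : PForest → List String → PForest
  | t, [] => t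
  | t, [p] => bSetdefaultFile t p
  | t, p :: rest => bRecurseAt (fun c => bInsert c rest) p (if bHas t p then t else bAddDir t p)

-- a stack frame: (prefix, name, subnode, is_last)
def stackW (fs : List (String × String × Option PForest × Bool)) : Nat :=
  (fs.map (fun f => owt f.2.2.1)).sum

-- push(node, prefix): Source B appends the sorted entries to the stack in reverse;
-- holding the stack head-first (head = top), the pushed block IS this in-order list.
def bPush (node : PForest) (pref : String) : List (String × String × Option PForest × Bool) :=
  (PySem.List.enumerate (sortEntries (pitems node))).map
    (fun e => (pref, e.2.1, e.2.2, e.1 == ((sortEntries (pitems node)).length : Int) - 1))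

theorem stackW_bPush (node : PForest) (pref : String) : stackW (bPush node pref) = node.fsize := by
  have h : ∀ (es : List (String × Option PForest)) (s : Int) (g : Int → Bool),
      ((PySem.List.enumerate es s).map
        (fun e => (pref, e.2.1, e.2.2, g e.1))).map (fun f => owt f.2.2.1)
      = es.map (fun e => owt e.2) := by
    intro es
    induction es with
    | nil => intro s g; simp [PySem.List.enumerate_nil]
    | cons x t ih => intro s g; simp [PySem.List.enumerate_cons, List.map_map] at ih ⊢
                     exact ih (s + 1) g
  simp only [bPush, stackW]
  exact (congrArg List.sum
      (h (sortEntries (pitems node)) 0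
        (fun i => i == ((sortEntries (pitems node)).length : Int) - 1))).trans
    ((entW_sortEntries (pitems node)).trans (entW_pitems node))

theorem stackW_append (a b : List (String × String × Option PForest × Bool)) :
    stackW (a ++ b) = stackW a + stackW b := by simp [stackW]

theorem stackW_cons (f : String × String × Option PForest × Bool)
    (rest : List (String × String × Option PForest × Bool)) :
    stackW (f :: rest) = owt f.2.2.1 + stackW rest := by simp [stackW]

theorem decPop (f : String × String × Option PForest × Bool)
    (rest : List (String × String × Option PForest × Bool)) :
    stackW rest < stackW (f :: rest) := by
  rw [stackW_cons]; cases hf : f.2.2.1 <;> simp [owt] <;> omega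

theorem decPush (pref name : String) (c : PForest) (isLast : Bool) (q : String)
    (rest : List (String × String × Option PForest × Bool)) :
    stackW (bPush c q ++ rest) < stackW ((pref, name, some c, isLast) :: rest) := by
  rw [stackW_append, stackW_bPush, stackW_cons]; simp [owt] <;> omega

-- the 'while stack:' loop, accumulating the line list
def bLoop : List (String × String × Option PForest × Bool) → List String → List String
  | [], acc => acc
  | (pref, name, sub, isLast) :: rest, acc =>
      let linePref := if isLast then "└── " else "├── "
      match sub with
      | none => bLoop rest (acc ++ [pref ++ linePref ++ name ++ "\n"])
      | some c =>
          bLoop (bPush c (pref ++ (if isLast then "    " else "│   ")) ++ rest)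
                (acc ++ [pref ++ linePref ++ name ++ "/" ++ "\n"])
termination_by fs _ => stackW fs
decreasing_by
  · exact decPop (pref, name, none, isLast) rest
  · exact decPush pref name c isLast _ rest

def format_repo_structure_alt (files : List (List (String × String))) : String :=
  let tree := files.foldl (fun t f => bInsert t (pathParts f)) PForest.nil
  PySem.Str.join "" (bLoop (bPush tree "") ["Directory Structure:\n\n"])

-- ===== PRECONDITION & SPEC =====

-- Pre_ excludes exactly the inputs where the Python A raises: a dict without a
-- "path" key (KeyError), and a path list in which some earlier path was stored as
-- a file (None) and a later path descends through it (TypeError: 'in' on None) —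
-- i.e. some split(p_j) is a strict "/"-split prefix of a later split(p_k) while no
-- path before j had already made split(p_j) a directory.
def Pre_format_repo_structure (files : List (List (String × String))) : Prop :=
  (∀ f ∈ files, ((PySem.Dict.mk f).get? "path").isSome = true) ∧
  ∀ (j k : Fin files.length), (j : Nat) < (k : Nat) →
    (pathParts files[j] <+: pathParts files[k] ∧ pathParts files[j] ≠ pathParts files[k]) →
    ∃ i : Fin files.length, (i : Nat) < (j : Nat) ∧
      (pathParts files[j] <+: pathParts files[i] ∧ pathParts files[j] ≠ pathParts files[i])

instance (files : List (List (String × String))) : Decidable (Pre_format_repo_structure files) := by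
  unfold Pre_format_repo_structure; infer_instance

def pvWitness_format_repo_structure : (List (List (String × String))) :=
  [[("path", "a/b")], [("path", "c")]]

def Spec_format_repo_structure (files : List (List (String × String))) (out : String) : Prop := out = format_repo_structure_alt files
instance (files : List (List (String × String))) (out : String) : Decidable (Spec_format_repo_structure files out) := by unfold Spec_format_repo_structure; infer_instance

-- ===== CLAIM (what is proved, stated in full; the proofs are below) =====
def Claim_equal_format_repo_structure : Prop := ∀ (files : List (List (String × String))), Dom_format_repo_structure files → Pre_format_repo_structure files → Spec_format_repo_structure files (format_repo_structure files)

-- ===== LEMMAS AND PROOFS =====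

-- Phase 1: A's descent loop and B's recursive _insert build the same trie.
theorem bHas_eq_aContains (t : PForest) (p : String) : bHas t p = aContains t p := by
  induction t <;> simp [bHas, aContains, *]

theorem bSetdefaultFile_eq (t : PForest) (p : String) :
    bSetdefaultFile t p = if aContains t p then t else aAppend t p none := by
  induction t with
  | nil => simp [bSetdefaultFile, aContains, aAppend]
  | file n r ih =>
      by_cases h : n == p <;>
        simp [bSetdefaultFile, aContains, aAppend, h, ih] <;> split_ifs <;> simp
  | dir n c r _ ih =>
      by_cases h : n == p <;>
        simp [bSetdefaultFile, aContains, aAppend, h, ih] <;> split_ifs <;> simp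

theorem bAddDir_eq (t : PForest) (p : String) (h : aContains t p = false) :
    bAddDir t p = aAppend t p (some .nil) := by
  induction t with
  | nil => simp [bAddDir, aAppend]
  | file n r ih => simp [aContains] at h; simp [bAddDir, aAppend, ih h.2]
  | dir n c r _ ih => simp [aContains] at h; simp [bAddDir, aAppend, ih h.2]

theorem descend_eq (go₁ go₂ : PForest → PForest) (hgo : ∀ c, go₁ c = go₂ c)
    (t : PForest) (p : String) : bRecurseAt go₁ p t = aDescend go₂ p t := by
  induction t with
  | nil => simp [bRecurseAt, aDescend]
  | file n r ih => simp [bRecurseAt, aDescend, ih]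
  | dir n c r _ ih => simp [bRecurseAt, aDescend, ih, hgo]

theorem insert_eq (parts : List String) (t : PForest) : bInsert t parts = aInsert t parts := by
  induction parts generalizing t with
  | nil => simp [bInsert, aInsert]
  | cons p rest ih =>
      cases rest with
      | nil => simpa [bInsert, aInsert] using bSetdefaultFile_eq t p
      | cons q rs =>
          have e1 : (if bHas t p then t else bAddDir t p)
              = (if aContains t p then t else aAppend t p (some .nil)) := by
            rw [bHas_eq_aContains]
            split_ifs with h
            · rfl
            · exact bAddDir_eq t p (by simpa using h)
          simp only [bInsert, aInsert, e1]
          exact descend_eq _ _ (fun c => ih c) _ p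

-- Phase 2: the stack loop.
theorem bLoop_acc (n : Nat) (fs : List (String × String × Option PForest × Bool))
    (acc : List String) (h : stackW fs ≤ n) : bLoop fs acc = acc ++ bLoop fs [] := by
  induction n generalizing fs acc with
  | zero =>
      cases fs with
      | nil => simp [bLoop]
      | cons f rest => rw [stackW_cons] at h; cases hh : f.2.2.1 <;> simp [hh, owt] at h
  | succ n ih =>
      cases fs with
      | nil => simp [bLoop]
      | cons f rest =>
          obtain ⟨pref, name, sub, isLast⟩ := f
          rw [stackW_cons] at h
          cases sub with
          | none =>
              have h1 : stackW rest ≤ n := by simp [owt] at h; omega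
              simp only [bLoop]
              rw [ih rest _ h1]
              simp only [List.nil_append]
              conv_rhs => rw [ih rest _ h1]
              simp
          | some c =>
              have hw : stackW (bPush c (pref ++ (if isLast then "    " else "│   ")) ++ rest) ≤ n := by
                rw [stackW_append, stackW_bPush]; simp [owt] at h; omega
              simp only [bLoop]
              rw [ih _ _ hw]
              simp only [List.nil_append]
              conv_rhs => rw [ih _ _ hw]
              simp

theorem bLoop_append (n : Nat) (fs gs : List (String × String × Option PForest × Bool))
    (acc : List String) (h : stackW fs ≤ n) :
    bLoop (fs ++ gs) acc = bLoop gs (bLoop fs acc) := by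
  induction n generalizing fs acc with
  | zero =>
      cases fs with
      | nil => simp [bLoop]
      | cons f rest => rw [stackW_cons] at h; cases hh : f.2.2.1 <;> simp [hh, owt] at h
  | succ n ih =>
      cases fs with
      | nil => simp [bLoop]
      | cons f rest =>
          obtain ⟨pref, name, sub, isLast⟩ := f
          rw [stackW_cons] at h
          cases sub with
          | none =>
              simp only [List.cons_append, bLoop]
              exact ih rest _ (by simp [owt] at h; omega)
          | some c =>
              simp only [List.cons_append, bLoop]
              rw [← List.append_assoc]
              exact ih _ _ (by rw [stackW_append, stackW_bPush]; simp [owt] at h; omega)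

-- the in-order frame block pushed for a node, as structural recursion
def framesRec : List (String × Option PForest) → String → List (String × String × Option PForest × Bool)
  | [], _ => []
  | (n, s) :: rest, pref => (pref, n, s, rest.isEmpty) :: framesRec rest pref

theorem enum_flags (pref : String) :
    ∀ (es : List (String × Option PForest)) (s L : Int), s + es.length = L →
      (PySem.List.enumerate es s).map (fun e => (pref, e.2.1, e.2.2, e.1 == L - 1))
        = framesRec es pref := by
  intro es
  induction es with
  | nil => intro s L _; simp [PySem.List.enumerate_nil, framesRec]
  | cons x t ih =>
      intro s L h
      obtain ⟨xn, xs⟩ := x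
      simp only [List.length_cons] at h
      have hb : (s == L - 1) = t.isEmpty := by
        cases t with
        | nil => simp at h ⊢; omega
        | cons y u =>
            simp only [List.isEmpty_cons]
            rw [Bool.eq_false_iff]
            simp only [ne_eq, beq_iff_eq]
            simp only [List.length_cons] at h
            push_cast at h
            omega
      simp only [PySem.List.enumerate_cons, List.map_cons, framesRec, hb]
      exact congrArg _ (ih (s + 1) L (by push_cast at h ⊢; omega))

theorem bPush_eq_framesRec (node : PForest) (pref : String) :
    bPush node pref = framesRec (sortEntries (pitems node)) pref := by
  exact enum_flags pref (sortEntries (pitems node)) 0 ((sortEntries (pitems node)).length : Int)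
    (by simp)

theorem intercalate_nil_chars (l : List (List Char)) : [].intercalate l = l.flatten := by
  induction l with
  | nil => simp [List.intercalate]
  | cons a t ih => cases t <;> simp_all [List.intercalate, List.intersperse]

theorem join_nil : PySem.Str.join "" ([] : List String) = "" := by
  simp [PySem.Str.join, PySem.Chars.join, List.intercalate]

theorem join_cons (x : String) (xs : List String) :
    PySem.Str.join "" (x :: xs) = x ++ PySem.Str.join "" xs := by
  simp only [PySem.Str.join, PySem.Chars.join, String.toList_empty, List.map_cons,
    intercalate_nil_chars, List.flatten_cons]
  rw [String.ofList_append, String.ofList_toList]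

theorem join_append (a b : List String) :
    PySem.Str.join "" (a ++ b) = PySem.Str.join "" a ++ PySem.Str.join "" b := by
  induction a with
  | nil => simp [join_nil]
  | cons x t ih => simp only [List.cons_append, join_cons, ih, String.append_assoc]

theorem loop_go (n : Nat) (es : List (String × Option PForest)) (pref : String)
    (h : entW es ≤ n) :
    PySem.Str.join "" (bLoop (framesRec es pref) []) = buildGo es pref := by
  induction n generalizing es pref with
  | zero =>
      cases es with
      | nil => simp [framesRec, bLoop, buildGo, PySem.Str.join, PySem.Chars.join, List.intercalate]
      | cons x t => rw [entW_cons] at h; cases hx : x.2 <;> simp [hx, owt] at h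
  | succ n ih =>
      cases es with
      | nil => simp [framesRec, bLoop, buildGo, PySem.Str.join, PySem.Chars.join, List.intercalate]
      | cons x rest =>
          obtain ⟨name, sub⟩ := x
          rw [entW_cons] at h
          cases sub with
          | none =>
              have h1 : entW rest ≤ n := by simp [owt] at h; omega
              simp only [framesRec, bLoop, List.nil_append]
              rw [bLoop_acc (stackW (framesRec rest pref)) _ _ le_rfl, join_append,
                join_cons, ih rest pref h1]
              simp [buildGo, join_nil]
          | some c =>
              have h1 : entW rest ≤ n := by simp [owt] at h; omega
              have h2 : entW (sortEntries (pitems c)) ≤ n := by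
                rw [entW_sortEntries, entW_pitems]; simp [owt] at h; omega
              simp only [framesRec, bLoop, List.nil_append]
              rw [bLoop_append (stackW (bPush c (pref ++ (if rest.isEmpty then "    " else "│   ")))) _ _ _ le_rfl,
                bLoop_acc (stackW (bPush c (pref ++ (if rest.isEmpty then "    " else "│   ")))) _ _ le_rfl,
                bLoop_acc (stackW (framesRec rest pref)) _ _ le_rfl]
              rw [join_append, join_append, join_cons]
              rw [bPush_eq_framesRec, ih _ _ h2, ih rest pref h1]
              simp [buildGo, join_nil, String.append_assoc]

theorem render_eq (t : PForest) :
    PySem.Str.join "" (bLoop (bPush t "") ["Directory Structure:\n\n"])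
      = "Directory Structure:\n\n" ++ buildA t "" := by
  rw [bPush_eq_framesRec,
    bLoop_acc (stackW (framesRec (sortEntries (pitems t)) "")) _ _ le_rfl,
    join_append, join_cons,
    loop_go (entW (sortEntries (pitems t))) _ _ le_rfl, ← buildA]
  simp [join_nil]

-- ===== VERDICT (by name: the statement is the Claim_ definition above) =====
theorem format_repo_structure_spec : Claim_equal_format_repo_structure := by
  intro files _ _
  unfold Spec_format_repo_structure format_repo_structure format_repo_structure_alt
  have ht : (fun t f => bInsert t (pathParts f)) = (fun t f => aInsert t (pathParts f)) := by
    funext t f; exact insert_eq _ _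
  rw [ht, render_eq]
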